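-- pv_equiv track=rewrite | github.com/def-gthill/bobs | bobs/__init__.py | preferred
-- ===== SOURCE A (Python) =====
-- def preferred(limit=None):
--     """
--     Generates a sequence of "preferred numbers".
--
--     These are nice round numbers that ascend in a
--     roughly exponential pattern. The current
--     implementation (and the default in all future
--     versions) is the sequence 1, 2, 3, 5, 7, 10,
--     15, 20, 30, 45, 70, and then repeating the
--     numbers 10 to 70 multiplied by each successive
--     power of 10.
--
--     If a limit is specified, the sequence will stop
--     at the last preferred number that doesn't exceed
--     that limit. Otherwise, the sequence will be
--     infinite.
--     """
--     for n in [1, 2, 3, 5, 7]: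
--         if n > limit:
--             return
--         yield n
--     p = 0
--     while True:
--         for a in [10, 15, 20, 30, 45, 70]:
--             n = a * 10 ** p
--             if n > limit:
--                 return
--             yield n
--         p += 1
-- ===== SOURCE B (Python) =====
-- def preferred(limit=None):
--     """Recursive divide-by-10 construction: the tail of the sequence is self-similar
--     (each block is the previous one times 10), so build the multiples part by
--     recursing on limit // 10 and scaling the result back up, instead of streaming
--     with nested loops and a cut-off guard."""
--     return [n for n in (1, 2, 3, 5, 7) if n <= limit] + _tens(limit)
--
--
-- def _tens(limit):
--     if limit < 10:
--         return []
--     return [a for a in (10, 15, 20, 30, 45, 70) if a <= limit] \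
--         + [10 * n for n in _tens(limit // 10)]
-- ===== Notes on version B (the rewrite author's own statement) =====
-- stated objective: alternative
-- what changed: B replaces A's nested generation loops with interleaved limit guards by a recursive divide-and-conquer construction: the multiples part of the sequence is self-similar, so B filters one block and recurses on limit // 10, scaling the recursive result back up by 10; the prefix is a filtered comprehension.
import Mathlib
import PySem

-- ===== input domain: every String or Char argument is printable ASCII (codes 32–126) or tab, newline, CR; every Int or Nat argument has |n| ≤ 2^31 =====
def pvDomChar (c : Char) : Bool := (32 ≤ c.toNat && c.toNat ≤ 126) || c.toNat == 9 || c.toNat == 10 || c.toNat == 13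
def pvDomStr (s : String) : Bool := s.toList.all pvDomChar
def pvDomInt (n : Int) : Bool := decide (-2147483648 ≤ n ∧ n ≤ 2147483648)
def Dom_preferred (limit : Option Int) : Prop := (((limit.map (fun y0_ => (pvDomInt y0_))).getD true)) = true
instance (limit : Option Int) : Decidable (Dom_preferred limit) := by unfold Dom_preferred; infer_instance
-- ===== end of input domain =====

-- B builds the list by recursion on limit // 10 (the tail of the sequence is self-similar:
-- each block is the previous one times 10), instead of A's nested generation loops with an
-- interleaved cut-off guard. Both Pythons raise TypeError for limit=None (excluded by Pre_).

-- ===== PORT A =====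
-- A's inner 'for' loop: yields a*10^p for each a until one exceeds L; the Bool records
-- whether the 'return' was taken (some element exceeded L). Also used for the [1,2,3,5,7]
-- prefix loop (with p = 0, so n = a * 10^0 = a).
def pvRunFor (L : Int) (p : Nat) : List Int → (List Int × Bool)
  | [] => ([], false)
  | a :: rest =>
    let n : Int := a * 10 ^ p
    if n > L then ([], true)
    else
      let r := pvRunFor L p rest
      (n :: r.1, r.2)

theorem pvRunFor_false_le (L : Int) (p : Nat) :
    (pvRunFor L p [10, 15, 20, 30, 45, 70]).2 = false → (10 : Int) * 10 ^ p ≤ L := by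
  simp only [pvRunFor]
  split_ifs with h₁ <;> simp_all

theorem pvPow_lt (p : Nat) : (p : Int) < 10 ^ p := by
  induction p with
  | zero => norm_num
  | succ n ih =>
    have h : (1:Int) ≤ 10 ^ n := one_le_pow₀ (by norm_num)
    push_cast
    rw [pow_succ]
    nlinarith

-- A's 'while True' loop starting at power p (terminates: the loop only continues while
-- 10 * 10^p ≤ L).
def pvWhileA (L : Int) (p : Nat) : List Int :=
  match h : pvRunFor L p [10, 15, 20, 30, 45, 70] with
  | (ys, true) => ys
  | (ys, false) => ys ++ pvWhileA L (p + 1)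
termination_by L.toNat - p
decreasing_by
  have h2 : (pvRunFor L p [10, 15, 20, 30, 45, 70]).2 = false := by rw [h]
  have hle := pvRunFor_false_le L p h2
  have hp := pvPow_lt p
  have : (p : Int) < L := by nlinarith
  omega

def preferred (limit : Option Int) : List Int :=
  match limit with
  | none => []   -- Python raises TypeError here ('n > None'); excluded by Pre_preferred
  | some L =>
    let r := pvRunFor L 0 [1, 2, 3, 5, 7]   -- the prefix 'for n in [1,2,3,5,7]' loop
    if r.2 then r.1 else r.1 ++ pvWhileA L 0

-- ===== PORT B =====
-- Source B's _tens: the multiples part is built by recursion on limit // 10, scaling the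
-- recursive result back up by 10.
def pvTens (L : Int) : List Int :=
  if L < 10 then []
  else (([10, 15, 20, 30, 45, 70] : List Int).filter (fun a => a ≤ L)) ++
       (pvTens (PySem.Int.floordiv L 10)).map (fun n => 10 * n)
termination_by L.toNat
decreasing_by
  rw [PySem.Int.floordiv_eq_ediv_of_pos (by norm_num)]
  omega

def preferred_alt (limit : Option Int) : List Int :=
  match limit with
  | none => []   -- Python raises TypeError here; excluded by Pre_preferred
  | some L =>
    (([1, 2, 3, 5, 7] : List Int).filter (fun n => n ≤ L)) ++ pvTens L

-- ===== PRECONDITION & SPEC =====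
-- Pre_ excludes only limit = None, on which both Pythons raise TypeError ('<=' / '>'
-- unsupported between int and NoneType) at the first comparison.
def Pre_preferred (limit : Option Int) : Prop := limit.isSome = true
instance (limit : Option Int) : Decidable (Pre_preferred limit) := by unfold Pre_preferred; infer_instance
def pvWitness_preferred : Option Int := some 100

def Spec_preferred (limit : Option Int) (out : List Int) : Prop := out = preferred_alt limit
instance (limit : Option Int) (out : List Int) : Decidable (Spec_preferred limit out) := by unfold Spec_preferred; infer_instance

-- ===== CLAIM =====
def Claim_equal_preferred : Prop := ∀ (limit : Option Int), Dom_preferred limit → Pre_preferred limit → Spec_preferred limit (preferred limit)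

-- ===== LEMMAS AND PROOFS =====

theorem pvWhileA_eq (L : Int) (p : Nat) :
    pvWhileA L p =
      (if (pvRunFor L p [10, 15, 20, 30, 45, 70]).2 then (pvRunFor L p [10, 15, 20, 30, 45, 70]).1
       else (pvRunFor L p [10, 15, 20, 30, 45, 70]).1 ++ pvWhileA L (p + 1)) := by
  conv_lhs => rw [pvWhileA]
  split
  · next ys h => rw [h]; simp
  · next ys h => rw [h]; simp

-- shifting the power by one is the same as dividing the limit by 10 and scaling the output.
theorem pvRunFor_shift (L : Int) (p : Nat) (as : List Int) :
    pvRunFor L (p + 1) as =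
      (((pvRunFor (L / 10) p as).1).map (fun n => 10 * n),
       (pvRunFor (L / 10) p as).2) := by
  induction as with
  | nil => simp [pvRunFor]
  | cons a rest ih =>
    have hiff : (a * 10 ^ (p + 1) > L) ↔ (a * 10 ^ p > L / 10) := by
      have hpow : a * 10 ^ (p + 1) = 10 * (a * 10 ^ p) := by ring
      rw [hpow]
      generalize a * 10 ^ p = x
      omega
    simp only [pvRunFor]
    by_cases hgt : a * 10 ^ p > L / 10
    · rw [if_pos (hiff.mpr hgt), if_pos hgt]
      rfl
    · rw [if_neg (fun h => hgt (hiff.mp h)), if_neg hgt, ih]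
      refine Prod.ext ?_ rfl
      simp only [List.map_cons]
      congr 1
      ring

theorem pvWhileA_shift (L : Int) (p : Nat) :
    pvWhileA L (p + 1) = (pvWhileA (L / 10) p).map (fun n => 10 * n) := by
  generalize hm : L.toNat - p = m
  induction m using Nat.strong_induction_on generalizing p with
  | _ m ih =>
    rw [pvWhileA_eq L (p + 1), pvWhileA_eq (L / 10) p, pvRunFor_shift]
    dsimp only
    by_cases hb : (pvRunFor (L / 10) p [10, 15, 20, 30, 45, 70]).2 = true
    · simp [hb]
    · simp only [hb, if_false, Bool.false_eq_true, List.map_append]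
      congr 1
      have hle := pvRunFor_false_le (L / 10) p (by simpa using hb)
      have hp := pvPow_lt p
      have hpow1 : (1 : Int) ≤ 10 ^ p := one_le_pow₀ (by norm_num)
      have hpL : (p : Int) < L / 10 := by nlinarith
      exact ih (L.toNat - (p + 1)) (by omega) (p + 1) rfl

-- pvRunFor at power 0 on an ascending list, in closed form (takeWhile = filter there).
theorem pvRunFor_zero_sorted (L : Int) (as : List Int) (h : as.Pairwise (· ≤ ·)) :
    pvRunFor L 0 as = (as.filter (fun a => a ≤ L), decide (¬ ∀ a ∈ as, a ≤ L)) := by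
  induction as with
  | nil => simp [pvRunFor]
  | cons a rest ih =>
    rw [List.pairwise_cons] at h
    simp only [pvRunFor, pow_zero, mul_one, List.filter_cons]
    by_cases hgt : a > L
    · have hfil : rest.filter (fun b => decide (b ≤ L)) = [] := by
        rw [List.filter_eq_nil_iff]
        intro b hb
        have := h.1 b hb
        simp
        omega
      have hna : ¬ (a ≤ L) := by omega
      simp [hgt, hna, hfil]
    · have hle : a ≤ L := by omega
      simp only [hgt, if_false, ih h.2]
      simp [hle]

theorem pvRunFor_zero_tens (L : Int) :
    pvRunFor L 0 [10, 15, 20, 30, 45, 70] =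
      ((([10, 15, 20, 30, 45, 70] : List Int).filter (fun a => a ≤ L)), decide (L < 70)) := by
  rw [pvRunFor_zero_sorted L _ (by decide)]
  congr 1
  rw [decide_eq_decide]
  constructor
  · intro hna
    by_contra hc
    push_neg at hc
    exact hna (by intro a ha; fin_cases ha <;> omega)
  · intro h70 hall
    exact absurd (hall 70 (by simp)) (by omega)

theorem pvRunFor_zero_prefix (L : Int) :
    pvRunFor L 0 [1, 2, 3, 5, 7] =
      ((([1, 2, 3, 5, 7] : List Int).filter (fun n => n ≤ L)), decide (L < 7)) := by
  rw [pvRunFor_zero_sorted L _ (by decide)]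
  congr 1
  rw [decide_eq_decide]
  constructor
  · intro hna
    by_contra hc
    push_neg at hc
    exact hna (by intro a ha; fin_cases ha <;> omega)
  · intro h7 hall
    exact absurd (hall 7 (by simp)) (by omega)

theorem pvWhileA_small (L : Int) (hL : L < 10) : pvWhileA L 0 = [] := by
  rw [pvWhileA_eq, pvRunFor_zero_tens]
  have hf : (([10, 15, 20, 30, 45, 70] : List Int).filter (fun a => a ≤ L)) = [] := by
    rw [List.filter_eq_nil_iff]
    intro b hb
    fin_cases hb <;> simp <;> omega
  simp [hf, show L < 70 by omega]

theorem pvTens_eq_whileA (L : Int) : pvTens L = pvWhileA L 0 := by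
  generalize hm : L.toNat = m
  induction m using Nat.strong_induction_on generalizing L with
  | _ m ih =>
    have hd : PySem.Int.floordiv L 10 = L / 10 := PySem.Int.floordiv_eq_ediv_of_pos (by norm_num)
    by_cases hL : L < 10
    · rw [pvTens, if_pos hL, pvWhileA_small L hL]
    · rw [pvTens, if_neg hL, pvWhileA_eq, pvRunFor_zero_tens, hd]
      by_cases h70 : L < 70
      · have h10 : L / 10 < 10 := by omega
        have hrec : pvTens (L / 10) = [] := by
          rw [pvTens, if_pos h10]
        simp [h70, hrec]
      · have hrec := ih (L / 10).toNat (by omega) (L / 10) rfl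
        rw [pvWhileA_shift L 0, hrec]
        simp [h70]

-- ===== VERDICT =====
theorem preferred_spec : Claim_equal_preferred := by
  intro limit _ hpre
  match limit with
  | none => simp [Pre_preferred] at hpre
  | some L =>
    unfold Spec_preferred preferred preferred_alt
    simp only [pvRunFor_zero_prefix]
    rw [pvTens_eq_whileA]
    by_cases h7 : L < 7
    · rw [pvWhileA_small L (by omega)]
      simp [h7]
    · simp [h7]
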